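-- pv_equiv track=rewrite | github.com/DaviEstevam12/PRINCIPAL | TRABALHO 6.py | ultima_vogal
-- ===== SOURCE A (Python) =====
-- def ultima_vogal(palavra):
--     '''...'''
--     i = 0
--     cont = []
--     while i < len(palavra):
--         if palavra[i] in 'aeiou':
--             cont.append(palavra[i])
--         i += 1
--     return cont[-1]
-- ===== SOURCE B (Python) =====
-- def ultima_vogal(palavra):
--     for c in reversed(palavra):
--         if c in 'aeiou':
--             return c
--     raise IndexError("list index out of range")
-- ===== Notes on version B (the rewrite author's own statement) =====
-- stated objective: faster
-- what changed: B scans the word from the end and returns the first vowel found (early exit, no intermediate list), instead of collecting all vowels into a list and taking its last element; B raises IndexError when no vowel exists, like A's cont[-1].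
import Mathlib
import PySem

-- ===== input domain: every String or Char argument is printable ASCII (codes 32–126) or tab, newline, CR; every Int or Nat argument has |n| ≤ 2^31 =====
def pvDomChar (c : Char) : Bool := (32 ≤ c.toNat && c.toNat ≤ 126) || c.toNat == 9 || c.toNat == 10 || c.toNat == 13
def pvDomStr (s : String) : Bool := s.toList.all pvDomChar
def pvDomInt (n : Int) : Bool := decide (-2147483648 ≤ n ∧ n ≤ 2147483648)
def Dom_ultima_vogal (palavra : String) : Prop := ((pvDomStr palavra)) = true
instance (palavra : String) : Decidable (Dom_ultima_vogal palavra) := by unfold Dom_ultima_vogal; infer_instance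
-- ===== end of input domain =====

-- B replaces A's collect-all-vowels-then-index pass by a reverse early-exit scan (return value only; both raise IndexError when no vowel exists, excluded by Pre_).
-- ===== PORT A =====
def ultima_vogal (palavra : String) : String :=
  let cont := palavra.toList.foldl
    (fun acc c => if c ∈ ['a','e','i','o','u'] then acc ++ [c] else acc) []
  match PySem.List.pyGet? cont (-1) with
  | some c => String.ofList [c]
  | none => ""   -- IndexError in Python; excluded by Pre_

-- ===== PORT B =====
def uvGo : List Char → String
  | [] => ""   -- IndexError in Python; excluded by Pre_
  | c :: rest => if c ∈ ['a','e','i','o','u'] then String.ofList [c] else uvGo rest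

def ultima_vogal_alt (palavra : String) : String :=
  uvGo palavra.toList.reverse

-- ===== PRECONDITION & SPEC =====
-- Pre_ excludes exactly the words with no lowercase vowel, on which both A (cont[-1]) and B raise IndexError.
def Pre_ultima_vogal (palavra : String) : Prop :=
  palavra.toList.any (fun c => c ∈ ['a','e','i','o','u']) = true
instance (palavra : String) : Decidable (Pre_ultima_vogal palavra) := by
  unfold Pre_ultima_vogal; infer_instance
def pvWitness_ultima_vogal : String := "banana"

def Spec_ultima_vogal (palavra : String) (out : String) : Prop := out = ultima_vogal_alt palavra
instance (palavra : String) (out : String) : Decidable (Spec_ultima_vogal palavra out) := by unfold Spec_ultima_vogal; infer_instance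

-- ===== CLAIM (what is proved, stated in full; the proofs are below) =====
def Claim_equal_ultima_vogal : Prop := ∀ (palavra : String), Dom_ultima_vogal palavra → Pre_ultima_vogal palavra → Spec_ultima_vogal palavra (ultima_vogal palavra)

-- ===== LEMMAS AND PROOFS =====

-- B's reverse scan returns the head of the filtered reversed list.
theorem uvGo_eq (l : List Char) :
    uvGo l = match (l.filter (fun c => c ∈ ['a','e','i','o','u'])).head? with
             | some c => String.ofList [c]
             | none => "" := by
  induction l with
  | nil => rfl
  | cons c rest ih =>
    simp only [uvGo, List.filter_cons, decide_eq_true_eq]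
    by_cases h : c ∈ ['a','e','i','o','u']
    · rw [if_pos h, if_pos h, List.head?_cons]
    · rw [if_neg h, if_neg h]; exact ih

-- ===== VERDICT (by name: the statement is the Claim_ definition above) =====
theorem ultima_vogal_spec : Claim_equal_ultima_vogal := by
  intro palavra _ _
  unfold Spec_ultima_vogal ultima_vogal ultima_vogal_alt
  rw [uvGo_eq, List.filter_reverse, List.head?_reverse]
  simp only [PySem.List.foldl_append_ite_eq_filter, List.nil_append,
             PySem.List.pyGet?_neg_one]
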